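-- pv_equiv track=rewrite | github.com/Yinghao-Li/BERT-NER | Src/Utils.py | label_to_span
-- ===== SOURCE A (Python) =====
-- from typing import List, Optional, Union, Dict, Tuple, Any
--
-- def label_to_span(labels: List[str],
--                   scheme: Optional[str] = 'BIO') -> dict:
--     """
--     convert labels to spans
--     :param labels: a list of labels
--     :param scheme: labeling scheme, in ['BIO', 'BILOU'].
--     :return: labeled spans, a list of tuples (start_idx, end_idx, label)
--     """
--     assert scheme in ['BIO', 'BILOU'], ValueError("unknown labeling scheme")
--
--     labeled_spans = dict()
--     i = 0
--     while i < len(labels):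
--         if labels[i] == 'O':
--             i += 1
--             continue
--         else:
--             if scheme == 'BIO':
--                 if labels[i][0] == 'B':
--                     start = i
--                     lb = labels[i][2:]
--                     i += 1
--                     try:
--                         while labels[i][0] == 'I':
--                             i += 1
--                         end = i
--                         labeled_spans[(start, end)] = lb
--                     except IndexError:
--                         end = i
--                         labeled_spans[(start, end)] = lb
--                         i += 1
--                 # this should not happen
--                 elif labels[i][0] == 'I':
--                     i += 1
--             elif scheme == 'BILOU':
--                 if labels[i][0] == 'U':
--                     start = i
--                     end = i + 1
--                     lb = labels[i][2:]
--                     labeled_spans[(start, end)] = lb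
--                     i += 1
--                 elif labels[i][0] == 'B':
--                     start = i
--                     lb = labels[i][2:]
--                     i += 1
--                     try:
--                         while labels[i][0] != 'L':
--                             i += 1
--                         end = i
--                         labeled_spans[(start, end)] = lb
--                     except IndexError:
--                         end = i
--                         labeled_spans[(start, end)] = lb
--                         break
--                     i += 1
--                 else:
--                     i += 1
--
--     return labeled_spans
-- ===== SOURCE B (Python) =====
-- def label_to_span(labels, scheme='BIO'):
--     """Single forward pass keeping the currently open span (start, label) as state."""
--     assert scheme in ['BIO', 'BILOU'], ValueError("unknown labeling scheme")
--     spans = {}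
--     start, lb = None, None
--     if scheme == 'BIO':
--         for i, tok in enumerate(labels):
--             if tok.startswith('B'):
--                 if start is not None:
--                     spans[(start, i)] = lb
--                 start, lb = i, tok[2:]
--             elif not tok.startswith('I'):
--                 if start is not None:
--                     spans[(start, i)] = lb
--                 start, lb = None, None
--         if start is not None:
--             spans[(start, len(labels))] = lb
--     else:  # BILOU
--         for i, tok in enumerate(labels):
--             if start is not None:
--                 if tok.startswith('L'):
--                     spans[(start, i)] = lb
--                     start, lb = None, None
--             elif tok.startswith('U'):
--                 spans[(i, i + 1)] = tok[2:]
--             elif tok.startswith('B'):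
--                 start, lb = i, tok[2:]
--         if start is not None:
--             spans[(start, len(labels))] = lb
--     return spans
-- ===== Notes on version B (the rewrite author's own statement) =====
-- stated objective: simpler
-- what changed: Replaces A's while-loop with manual index jumps and try/except-IndexError span closing by a single for-loop over enumerate(labels) with one explicit open-span state variable, closing spans at B/O/L boundaries and at end of list.
-- outside the precondition, e.g. on label_to_span(['B-X', '', 'O'], 'BIO'): A returns {(0, 1): 'X'}, B returns {(0, 1): 'X'}; on label_to_span(['B-X', '', 'O', 'U-Y'], 'BILOU'): A returns {(0, 1): 'X'}, B returns {(0, 4): 'X'}; on label_to_span(['X'], 'BIO'): A does not finish within the time limit, B returns {}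
import Mathlib
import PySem

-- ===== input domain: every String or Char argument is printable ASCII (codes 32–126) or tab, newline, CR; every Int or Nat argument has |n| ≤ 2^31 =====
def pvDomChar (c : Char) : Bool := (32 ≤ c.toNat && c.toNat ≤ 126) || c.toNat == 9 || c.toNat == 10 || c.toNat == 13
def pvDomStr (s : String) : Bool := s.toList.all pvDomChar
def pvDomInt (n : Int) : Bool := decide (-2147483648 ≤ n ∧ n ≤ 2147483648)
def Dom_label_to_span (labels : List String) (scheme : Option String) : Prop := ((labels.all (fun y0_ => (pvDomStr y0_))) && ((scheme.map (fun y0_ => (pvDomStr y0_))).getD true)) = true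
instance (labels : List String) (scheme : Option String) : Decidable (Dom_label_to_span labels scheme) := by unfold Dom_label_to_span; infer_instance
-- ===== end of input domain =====

-- B replaces A's while-loop with manual index jumps and try/except-IndexError span closing by one
-- for-loop over enumerate(labels) carrying the currently open span as state (objective: simpler).

-- ===== PORT A =====

-- inner 'while labels[i][0] == 'I': i += 1' of the BIO branch; second component = IndexError caught
-- (labels[i] with i past the end, or labels[i][0] on an empty string)
def pvAInnerBIO (labels : List String) (i : Nat) : Nat × Bool :=
  if h : i < labels.length then
    if (labels[i]).toList = [] then (i, true)
    else if (labels[i]).toList.head? = some 'I' then pvAInnerBIO labels (i + 1)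
    else (i, false)
  else (i, true)
termination_by labels.length - i

-- inner 'while labels[i][0] != 'L': i += 1' of the BILOU branch; second component = IndexError caught
def pvAInnerBILOU (labels : List String) (i : Nat) : Nat × Bool :=
  if h : i < labels.length then
    if (labels[i]).toList = [] then (i, true)
    else if (labels[i]).toList.head? = some 'L' then (i, false)
    else pvAInnerBILOU labels (i + 1)
  else (i, true)
termination_by labels.length - i

-- the outer while loop of A; fuel only makes it total (the Python diverges on BIO tokens
-- outside O/B…/I…, and raises IndexError on labels[i][0] for "" at the top level — both outside Pre_)
def pvALoop (labels : List String) (scheme : Option String) :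
    Nat → Nat → PySem.Dict (Int × Int) String → PySem.Dict (Int × Int) String
  | 0, _, d => d
  | fuel + 1, i, d =>
    if h : i < labels.length then
      let l := labels[i]
      if l = "O" then pvALoop labels scheme fuel (i + 1) d
      else if scheme = some "BIO" then
        if l.toList.head? = some 'B' then
          let lb := PySem.Str.slice l (some 2) none
          let p := pvAInnerBIO labels (i + 1)
          let d' := d.insert ((i : Int), (p.1 : Int)) lb
          if p.2 then pvALoop labels scheme fuel (p.1 + 1) d'
          else pvALoop labels scheme fuel p.1 d'
        else if l.toList.head? = some 'I' then pvALoop labels scheme fuel (i + 1) d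
        else pvALoop labels scheme fuel i d      -- Python loops forever here (or raises on ""); outside Pre_
      else if scheme = some "BILOU" then
        if l.toList.head? = some 'U' then
          pvALoop labels scheme fuel (i + 1)
            (d.insert ((i : Int), (i : Int) + 1) (PySem.Str.slice l (some 2) none))
        else if l.toList.head? = some 'B' then
          let lb := PySem.Str.slice l (some 2) none
          let p := pvAInnerBILOU labels (i + 1)
          let d' := d.insert ((i : Int), (p.1 : Int)) lb
          if p.2 then d'                         -- 'break'
          else pvALoop labels scheme fuel (p.1 + 1) d'
        else pvALoop labels scheme fuel (i + 1) d
      else d                                     -- unreachable: the assert raises on other schemes (outside Pre_)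
    else d

def label_to_span (labels : List String) (scheme : Option String) : List (Int × Int × String) :=
  (pvALoop labels scheme (labels.length + 1) 0 PySem.Dict.empty).items.map
    (fun p => (p.1.1, p.1.2, p.2))

-- ===== PORT B =====

-- BIO pass of Source B: state st = currently open span (start, label)
def pvBBIO (i : Nat) (st : Option (Nat × String)) (d : PySem.Dict (Int × Int) String) :
    List String → PySem.Dict (Int × Int) String
  | [] =>
      match st with
      | none => d
      | some (s, lb) => d.insert ((s : Int), (i : Int)) lb
  | tok :: rest =>
      if PySem.Str.startswith tok "B" then
        let d' := match st with
          | none => d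
          | some (s, lb) => d.insert ((s : Int), (i : Int)) lb
        pvBBIO (i + 1) (some (i, PySem.Str.slice tok (some 2) none)) d' rest
      else if PySem.Str.startswith tok "I" then
        pvBBIO (i + 1) st d rest
      else
        let d' := match st with
          | none => d
          | some (s, lb) => d.insert ((s : Int), (i : Int)) lb
        pvBBIO (i + 1) none d' rest

-- BILOU pass of Source B
def pvBBILOU (i : Nat) (st : Option (Nat × String)) (d : PySem.Dict (Int × Int) String) :
    List String → PySem.Dict (Int × Int) String
  | [] =>
      match st with
      | none => d
      | some (s, lb) => d.insert ((s : Int), (i : Int)) lb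
  | tok :: rest =>
      match st with
      | some (s, lb) =>
          if PySem.Str.startswith tok "L" then
            pvBBILOU (i + 1) none (d.insert ((s : Int), (i : Int)) lb) rest
          else pvBBILOU (i + 1) (some (s, lb)) d rest
      | none =>
          if PySem.Str.startswith tok "U" then
            pvBBILOU (i + 1) none
              (d.insert ((i : Int), (i : Int) + 1) (PySem.Str.slice tok (some 2) none)) rest
          else if PySem.Str.startswith tok "B" then
            pvBBILOU (i + 1) (some (i, PySem.Str.slice tok (some 2) none)) d rest
          else pvBBILOU (i + 1) none d rest

def label_to_span_alt (labels : List String) (scheme : Option String) : List (Int × Int × String) :=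
  if scheme = some "BIO" then
    (pvBBIO 0 none PySem.Dict.empty labels).items.map (fun p => (p.1.1, p.1.2, p.2))
  else if scheme = some "BILOU" then
    (pvBBILOU 0 none PySem.Dict.empty labels).items.map (fun p => (p.1.1, p.1.2, p.2))
  else []                                        -- Python B's assert raises here (outside Pre_)

-- ===== PRECONDITION & SPEC =====
-- Pre_ admits the two legal schemes (the assert raises otherwise) and excludes labels that make A raise
-- IndexError or loop forever: in BIO any label other than 'O' / B… / I… makes A diverge at the top level
-- or raise on ""; in BILOU an empty label raises IndexError at the top level and, when it occurs inside a
-- B… span scan, the caught IndexError accidentally truncates the whole result — an artefact of A's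
-- exception control flow no caller would specify (see cites for excluded inputs on which A still returns).
def Pre_label_to_span (labels : List String) (scheme : Option String) : Prop :=
  (scheme = some "BIO" ∧
    ∀ l ∈ labels, l = "O" ∨ l.toList.head? = some 'B' ∨ l.toList.head? = some 'I')
  ∨ (scheme = some "BILOU" ∧ ∀ l ∈ labels, l ≠ "")
instance (labels : List String) (scheme : Option String) : Decidable (Pre_label_to_span labels scheme) := by
  unfold Pre_label_to_span; infer_instance

def pvWitness_label_to_span : List String × Option String :=
  (["B-PER", "I-PER", "O", "B-LOC"], some "BIO")

def Spec_label_to_span (labels : List String) (scheme : Option String) (out : List (Int × Int × String)) : Prop := out = label_to_span_alt labels scheme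
instance (labels : List String) (scheme : Option String) (out : List (Int × Int × String)) : Decidable (Spec_label_to_span labels scheme out) := by unfold Spec_label_to_span; infer_instance

-- ===== CLAIM (what is proved, stated in full; the proofs are below) =====
def Claim_equal_label_to_span : Prop := ∀ (labels : List String) (scheme : Option String), Dom_label_to_span labels scheme → Pre_label_to_span labels scheme → Spec_label_to_span labels scheme (label_to_span labels scheme)

-- ===== LEMMAS AND PROOFS =====

-- s.startswith(p) for a one-character p on a non-empty s is a test on the first character
lemma pv_sw (tok : String) (c a : Char) (t : List Char) (h : tok.toList = a :: t) (p : String)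
    (hp : p.toList = [c]) :
    PySem.Str.startswith tok p = decide (a = c) := by
  simp [PySem.Str.startswith, PySem.Chars.startswith, h, hp, List.isPrefixOf]
  by_cases hac : a = c
  · simp [hac]
  · simp [hac]; exact fun h' => hac h'.symm

lemma pv_drop (l : List String) (i : Nat) (h : i < l.length) :
    l.drop i = l.getD i "" :: l.drop (i + 1) := by
  rw [List.getD_eq_getElem l "" h]
  exact List.drop_eq_getElem_cons h

lemma pvALoop_out (labels : List String) (scheme : Option String) (fuel i : Nat)
    (d : PySem.Dict (Int × Int) String) (h : labels.length ≤ i) :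
    pvALoop labels scheme fuel i d = d := by
  cases fuel with
  | zero => rfl
  | succ f => rw [pvALoop]; rw [dif_neg (by omega)]

-- characterisation of the BIO inner scan plus transport of B's open-state pass across the scanned run
lemma pv_bio_scan (labels : List String)
    (hpre : ∀ l ∈ labels, l = "O" ∨ l.toList.head? = some 'B' ∨ l.toList.head? = some 'I') :
    ∀ k i, labels.length - i ≤ k → i ≤ labels.length →
      i ≤ (pvAInnerBIO labels i).1 ∧ (pvAInnerBIO labels i).1 ≤ labels.length ∧
      ((pvAInnerBIO labels i).2 = true → (pvAInnerBIO labels i).1 = labels.length) ∧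
      ((pvAInnerBIO labels i).2 = false → (pvAInnerBIO labels i).1 < labels.length ∧
        ¬ (labels.getD (pvAInnerBIO labels i).1 "").toList.head? = some 'I') ∧
      (∀ s lb d, pvBBIO i (some (s, lb)) d (labels.drop i) =
        pvBBIO (pvAInnerBIO labels i).1 (some (s, lb)) d (labels.drop (pvAInnerBIO labels i).1)) := by
  intro k
  induction k with
  | zero =>
    intro i hk hile
    have h : ¬ i < labels.length := by omega
    have heq : pvAInnerBIO labels i = (i, true) := by rw [pvAInnerBIO, dif_neg h]
    rw [heq]
    exact ⟨le_refl i, hile, fun _ => by omega, fun hf => by simp at hf, fun s lb d => rfl⟩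
  | succ k ih =>
    intro i hk hile
    by_cases h : i < labels.length
    · have hmem : labels[i] ∈ labels := List.getElem_mem h
      have hgd : labels.getD i "" = labels[i] := List.getD_eq_getElem labels "" h
      obtain ⟨a, t, hcl⟩ : ∃ a t, (labels[i]).toList = a :: t := by
        rcases hpre labels[i] hmem with hO | hB | hI
        · exact ⟨'O', [], by rw [hO]; decide⟩
        · rcases hx : (labels[i]).toList with _ | ⟨a, t⟩
          · rw [hx] at hB; simp at hB
          · exact ⟨a, t, rfl⟩
        · rcases hx : (labels[i]).toList with _ | ⟨a, t⟩
          · rw [hx] at hI; simp at hI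
          · exact ⟨a, t, rfl⟩
      have hne : (labels[i]).toList ≠ [] := by rw [hcl]; simp
      by_cases hI : a = 'I'
      · have heq : pvAInnerBIO labels i = pvAInnerBIO labels (i + 1) := by
          rw [pvAInnerBIO, dif_pos h, if_neg hne, if_pos (by rw [hcl, hI]; rfl)]
        obtain ⟨h1, h2, h3, h4, h5⟩ := ih (i + 1) (by omega) (by omega)
        rw [heq]
        refine ⟨by omega, h2, h3, h4, fun s lb d => ?_⟩
        rw [pv_drop labels i h, hgd,
          pvBBIO, pv_sw labels[i] 'B' a t hcl "B" (by decide), if_neg (by simp [hI]),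
          pv_sw labels[i] 'I' a t hcl "I" (by decide), if_pos (by simp [hI])]
        exact h5 s lb d
      · have heq : pvAInnerBIO labels i = (i, false) := by
          rw [pvAInnerBIO, dif_pos h, if_neg hne,
            if_neg (by rw [hcl]; simp; exact fun h' => hI h')]
        rw [heq]
        exact ⟨le_refl i, by omega, fun hf => by simp at hf,
          fun _ => ⟨h, by rw [hgd, hcl]; simp; exact fun h' => hI h'⟩, fun s lb d => rfl⟩
    · have heq : pvAInnerBIO labels i = (i, true) := by rw [pvAInnerBIO, dif_neg h]
      rw [heq]
      exact ⟨le_refl i, hile, fun _ => by omega, fun hf => by simp at hf, fun s lb d => rfl⟩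

lemma pv_bilou_scan (labels : List String)
    (hpre : ∀ l ∈ labels, l ≠ "") :
    ∀ k i, labels.length - i ≤ k → i ≤ labels.length →
      i ≤ (pvAInnerBILOU labels i).1 ∧ (pvAInnerBILOU labels i).1 ≤ labels.length ∧
      ((pvAInnerBILOU labels i).2 = true → (pvAInnerBILOU labels i).1 = labels.length) ∧
      ((pvAInnerBILOU labels i).2 = false → (pvAInnerBILOU labels i).1 < labels.length ∧
        (labels.getD (pvAInnerBILOU labels i).1 "").toList.head? = some 'L') ∧
      (∀ s lb d, pvBBILOU i (some (s, lb)) d (labels.drop i) =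
        pvBBILOU (pvAInnerBILOU labels i).1 (some (s, lb)) d (labels.drop (pvAInnerBILOU labels i).1)) := by
  intro k
  induction k with
  | zero =>
    intro i hk hile
    have h : ¬ i < labels.length := by omega
    have heq : pvAInnerBILOU labels i = (i, true) := by rw [pvAInnerBILOU, dif_neg h]
    rw [heq]
    exact ⟨le_refl i, hile, fun _ => by omega, fun hf => by simp at hf, fun s lb d => rfl⟩
  | succ k ih =>
    intro i hk hile
    by_cases h : i < labels.length
    · have hmem : labels[i] ∈ labels := List.getElem_mem h
      have hgd : labels.getD i "" = labels[i] := List.getD_eq_getElem labels "" h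
      obtain ⟨a, t, hcl⟩ : ∃ a t, (labels[i]).toList = a :: t := by
        rcases hx : (labels[i]).toList with _ | ⟨a, t⟩
        · exact absurd (by rw [← String.toList_inj, hx]; rfl) (hpre labels[i] hmem)
        · exact ⟨a, t, rfl⟩
      have hne : (labels[i]).toList ≠ [] := by rw [hcl]; simp
      by_cases hL : a = 'L'
      · have heq : pvAInnerBILOU labels i = (i, false) := by
          rw [pvAInnerBILOU, dif_pos h, if_neg hne, if_pos (by rw [hcl, hL]; rfl)]
        rw [heq]
        exact ⟨le_refl i, by omega, fun hf => by simp at hf,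
          fun _ => ⟨h, by rw [hgd, hcl, hL]; rfl⟩, fun s lb d => rfl⟩
      · have heq : pvAInnerBILOU labels i = pvAInnerBILOU labels (i + 1) := by
          rw [pvAInnerBILOU, dif_pos h, if_neg hne,
            if_neg (by rw [hcl]; simp; exact fun h' => hL h')]
        obtain ⟨h1, h2, h3, h4, h5⟩ := ih (i + 1) (by omega) (by omega)
        rw [heq]
        refine ⟨by omega, h2, h3, h4, fun s lb d => ?_⟩
        rw [pv_drop labels i h, hgd, pvBBILOU,
          pv_sw labels[i] 'L' a t hcl "L" (by decide), if_neg (by simp [hL])]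
        exact h5 s lb d
    · have heq : pvAInnerBILOU labels i = (i, true) := by rw [pvAInnerBILOU, dif_neg h]
      rw [heq]
      exact ⟨le_refl i, hile, fun _ => by omega, fun hf => by simp at hf, fun s lb d => rfl⟩

-- at a position whose token is not a continuation, B's open span closes exactly as A already recorded it
lemma pv_bclose (labels : List String)
    (hpre : ∀ l ∈ labels, l = "O" ∨ l.toList.head? = some 'B' ∨ l.toList.head? = some 'I')
    (e : Nat) (he : ¬ (labels.getD e "").toList.head? = some 'I')
    (s : Nat) (lb : String) (d : PySem.Dict (Int × Int) String) :
    pvBBIO e (some (s, lb)) d (labels.drop e) =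
      pvBBIO e none (d.insert ((s : Int), (e : Int)) lb) (labels.drop e) := by
  by_cases h : e < labels.length
  · have hmem : labels[e] ∈ labels := List.getElem_mem h
    have hgd : labels.getD e "" = labels[e] := List.getD_eq_getElem labels "" h
    rw [hgd] at he
    rw [pv_drop labels e h, hgd]
    rcases hpre labels[e] hmem with hO | hB | hI
    · rw [hO]
      simp only [pvBBIO, show PySem.Str.startswith "O" "B" = false from by decide,
        show PySem.Str.startswith "O" "I" = false from by decide]
      simp
    · obtain ⟨t, hcl⟩ : ∃ t, (labels[e]).toList = 'B' :: t := by
        rcases hx : (labels[e]).toList with _ | ⟨a, t⟩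
        · rw [hx] at hB; simp at hB
        · rw [hx] at hB; simp at hB; exact ⟨t, by rw [hB]⟩
      simp only [pvBBIO, pv_sw labels[e] 'B' 'B' t hcl "B" (by decide)]
      simp
    · exact absurd hI he
  · rw [List.drop_eq_nil_of_le (by omega)]
    rfl

lemma pv_bio_main (labels : List String)
    (hpre : ∀ l ∈ labels, l = "O" ∨ l.toList.head? = some 'B' ∨ l.toList.head? = some 'I') :
    ∀ fuel i d, labels.length - i < fuel →
      pvALoop labels (some "BIO") fuel i d = pvBBIO i none d (labels.drop i) := by
  intro fuel
  induction fuel with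
  | zero => intro i d hf; omega
  | succ fuel ih =>
    intro i d hf
    by_cases h : i < labels.length
    · have hmem : labels[i] ∈ labels := List.getElem_mem h
      have hgd : labels.getD i "" = labels[i] := List.getD_eq_getElem labels "" h
      by_cases hO : labels[i] = "O"
      · rw [pvALoop]
        simp only [dif_pos h, if_pos hO]
        rw [ih (i + 1) d (by omega), pv_drop labels i h, hgd, hO]
        simp only [pvBBIO, show PySem.Str.startswith "O" "B" = false from by decide,
          show PySem.Str.startswith "O" "I" = false from by decide]
        simp
      · rcases hpre labels[i] hmem with h' | hB | hI
        · exact absurd h' hO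
        · obtain ⟨t, hcl⟩ : ∃ t, (labels[i]).toList = 'B' :: t := by
            rcases hx : (labels[i]).toList with _ | ⟨a, t⟩
            · rw [hx] at hB; simp at hB
            · rw [hx] at hB; simp at hB; exact ⟨t, by rw [hB]⟩
          obtain ⟨hp1, hp2, hp3, hp4, hp5⟩ :=
            pv_bio_scan labels hpre labels.length (i + 1) (by omega) (by omega)
          rw [pvALoop]
          simp only [dif_pos h, if_neg hO, if_pos hB]
          rw [pv_drop labels i h, hgd]
          simp only [pvBBIO, pv_sw labels[i] 'B' 'B' t hcl "B" (by decide), decide_true]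
          rw [hp5 i (PySem.Str.slice labels[i] (some 2) none) d]
          cases hc : (pvAInnerBIO labels (i + 1)).2
          · obtain ⟨hlt, hhd⟩ := hp4 hc
            simp only [Bool.false_eq_true, if_false, if_true]
            rw [ih (pvAInnerBIO labels (i + 1)).1 _ (by omega),
              pv_bclose labels hpre (pvAInnerBIO labels (i + 1)).1 hhd i
                (PySem.Str.slice labels[i] (some 2) none) d]
          · have he : (pvAInnerBIO labels (i + 1)).1 = labels.length := hp3 hc
            simp only [if_true]
            rw [pvALoop_out labels (some "BIO") fuel _ _ (by omega), he,
              List.drop_eq_nil_of_le (le_refl _)]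
            simp [pvBBIO]
        · obtain ⟨t, hcl⟩ : ∃ t, (labels[i]).toList = 'I' :: t := by
            rcases hx : (labels[i]).toList with _ | ⟨a, t⟩
            · rw [hx] at hI; simp at hI
            · rw [hx] at hI; simp at hI; exact ⟨t, by rw [hI]⟩
          rw [pvALoop]
          simp only [dif_pos h, if_neg hO,
            if_neg (show ¬ (labels[i]).toList.head? = some 'B' by rw [hI]; decide), if_pos hI]
          rw [ih (i + 1) d (by omega), pv_drop labels i h, hgd]
          simp only [pvBBIO, pv_sw labels[i] 'B' 'I' t hcl "B" (by decide),
            pv_sw labels[i] 'I' 'I' t hcl "I" (by decide)]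
          simp
    · rw [pvALoop, dif_neg h, List.drop_eq_nil_of_le (by omega)]
      rfl

lemma pv_bilou_main (labels : List String) (hpre : ∀ l ∈ labels, l ≠ "") :
    ∀ fuel i d, labels.length - i < fuel →
      pvALoop labels (some "BILOU") fuel i d = pvBBILOU i none d (labels.drop i) := by
  intro fuel
  induction fuel with
  | zero => intro i d hf; omega
  | succ fuel ih =>
    intro i d hf
    by_cases h : i < labels.length
    · have hmem : labels[i] ∈ labels := List.getElem_mem h
      have hgd : labels.getD i "" = labels[i] := List.getD_eq_getElem labels "" h
      by_cases hO : labels[i] = "O"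
      · rw [pvALoop]
        simp only [dif_pos h, if_pos hO]
        rw [ih (i + 1) d (by omega), pv_drop labels i h, hgd, hO]
        simp only [pvBBILOU, show PySem.Str.startswith "O" "U" = false from by decide,
          show PySem.Str.startswith "O" "B" = false from by decide]
        simp
      · obtain ⟨a, t, hcl⟩ : ∃ a t, (labels[i]).toList = a :: t := by
          rcases hx : (labels[i]).toList with _ | ⟨a, t⟩
          · exact absurd (by rw [← String.toList_inj, hx]; rfl) (hpre labels[i] hmem)
          · exact ⟨a, t, rfl⟩
        rw [pvALoop]
        simp only [dif_pos h, if_neg hO, if_neg (show ¬ (some "BILOU" = some "BIO") from by decide)]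
        rw [pv_drop labels i h, hgd]
        by_cases hU : a = 'U'
        · simp only [if_pos (show (labels[i]).toList.head? = some 'U' by rw [hcl, hU]; rfl)]
          rw [ih (i + 1) _ (by omega)]
          simp only [pvBBILOU, pv_sw labels[i] 'U' a t hcl "U" (by decide)]
          simp [hU]
        · by_cases hBh : a = 'B'
          · simp only [if_neg (show ¬ (labels[i]).toList.head? = some 'U' by rw [hcl, hBh]; simp),
              if_pos (show (labels[i]).toList.head? = some 'B' by rw [hcl, hBh]; rfl)]
            obtain ⟨hp1, hp2, hp3, hp4, hp5⟩ :=
              pv_bilou_scan labels hpre labels.length (i + 1) (by omega) (by omega)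
            simp only [pvBBILOU, pv_sw labels[i] 'U' a t hcl "U" (by decide),
              pv_sw labels[i] 'B' a t hcl "B" (by decide), hBh]
            simp only [show (decide ('B' = 'U')) = false from by decide,
              show (decide ('B' = 'B')) = true from by decide, Bool.false_eq_true, if_false, if_true]
            rw [hp5 i (PySem.Str.slice labels[i] (some 2) none) d]
            cases hc : (pvAInnerBILOU labels (i + 1)).2
            · obtain ⟨hlt, hhd⟩ := hp4 hc
              simp only [Bool.false_eq_true, if_false]
              have hmemE : labels[(pvAInnerBILOU labels (i + 1)).1] ∈ labels := List.getElem_mem hlt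
              have hgdE : labels.getD (pvAInnerBILOU labels (i + 1)).1 "" =
                  labels[(pvAInnerBILOU labels (i + 1)).1] :=
                List.getD_eq_getElem labels "" hlt
              rw [hgdE] at hhd
              obtain ⟨t', hcl'⟩ : ∃ t', (labels[(pvAInnerBILOU labels (i + 1)).1]).toList = 'L' :: t' := by
                rcases hx : (labels[(pvAInnerBILOU labels (i + 1)).1]).toList with _ | ⟨a', t'⟩
                · rw [hx] at hhd; simp at hhd
                · rw [hx] at hhd; simp at hhd; exact ⟨t', by rw [hhd]⟩
              rw [pv_drop labels _ hlt, hgdE]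
              simp only [pvBBILOU,
                pv_sw labels[(pvAInnerBILOU labels (i + 1)).1] 'L' 'L' t' hcl' "L" (by decide),
                decide_true]
              rw [ih ((pvAInnerBILOU labels (i + 1)).1 + 1) _ (by omega)]
              simp
            · have he : (pvAInnerBILOU labels (i + 1)).1 = labels.length := hp3 hc
              simp only [if_true]
              rw [he, List.drop_eq_nil_of_le (le_refl _)]
              simp [pvBBILOU]
          · simp only [if_neg (show ¬ (labels[i]).toList.head? = some 'U' by rw [hcl]; simp [hU]),
              if_neg (show ¬ (labels[i]).toList.head? = some 'B' by rw [hcl]; simp [hBh])]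
            rw [ih (i + 1) d (by omega)]
            simp only [pvBBILOU, pv_sw labels[i] 'U' a t hcl "U" (by decide),
              pv_sw labels[i] 'B' a t hcl "B" (by decide)]
            simp [hU, hBh]
    · rw [pvALoop, dif_neg h, List.drop_eq_nil_of_le (by omega)]
      rfl

-- ===== VERDICT (by name: the statement is the Claim_ definition above) =====
theorem label_to_span_spec : Claim_equal_label_to_span := by
  intro labels scheme _hdom hpre
  unfold Spec_label_to_span label_to_span label_to_span_alt
  rcases hpre with ⟨hsch, hlab⟩ | ⟨hsch, hlab⟩ <;> subst hsch
  · rw [pv_bio_main labels hlab (labels.length + 1) 0 PySem.Dict.empty (by omega), List.drop_zero]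
    simp
  · rw [pv_bilou_main labels hlab (labels.length + 1) 0 PySem.Dict.empty (by omega), List.drop_zero]
    simp
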